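-- pv_equiv track=rewrite | github.com/publicsuffix/list | trie_script.py | suffix_is_less
-- ===== SOURCE A (Python) =====
-- def suffix_is_less(suffix_1, suffix_2):
--     if suffix_1[-1] > suffix_2[-1]:
--         return False
--     elif suffix_1[-1] == suffix_2[-1]:
--         if len(suffix_1) > 1:
--             if len(suffix_2) <= 1:
--                 return False
--             else:
--                 return suffix_is_less(suffix_1[:-1], suffix_2[:-1])
--     return True
-- ===== SOURCE B (Python) =====
-- def suffix_is_less(suffix_1, suffix_2):
--     # Fast path: decide on the last labels; only on a tie fall back to one
--     # built-in reversed lexicographic comparison (non-strict).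
--     if suffix_1[-1] != suffix_2[-1]:
--         return suffix_1[-1] < suffix_2[-1]
--     return suffix_1[::-1] <= suffix_2[::-1]
-- ===== Notes on version B (the rewrite author's own statement) =====
-- stated objective: simpler
-- what changed: Replaces the recursive branch cascade over repeatedly sliced lists by one last-element comparison plus a single built-in non-strict lexicographic comparison of the reversed lists.
import Mathlib
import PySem

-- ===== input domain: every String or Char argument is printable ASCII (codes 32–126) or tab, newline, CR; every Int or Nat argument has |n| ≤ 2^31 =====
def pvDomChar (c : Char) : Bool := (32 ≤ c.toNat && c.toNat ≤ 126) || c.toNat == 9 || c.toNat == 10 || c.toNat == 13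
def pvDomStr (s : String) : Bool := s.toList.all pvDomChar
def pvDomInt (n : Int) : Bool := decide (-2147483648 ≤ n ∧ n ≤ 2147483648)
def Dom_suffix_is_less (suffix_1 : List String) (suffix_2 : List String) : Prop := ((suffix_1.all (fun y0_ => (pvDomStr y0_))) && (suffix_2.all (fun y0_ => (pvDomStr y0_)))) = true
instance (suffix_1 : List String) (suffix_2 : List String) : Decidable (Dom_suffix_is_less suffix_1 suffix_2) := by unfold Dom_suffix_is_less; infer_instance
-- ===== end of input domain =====

-- B replaces A's recursive branch cascade over repeatedly sliced lists by one
-- last-element comparison plus a single non-strict lexicographic comparison of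
-- the reversed lists (simpler, same result).

-- ===== PORT A =====
-- literal transliteration of A: suffix_1[-1]/suffix_2[-1] via pyGet? (-1);
-- s[:-1] via slice … (some (-1)); the `| _, _` arm is the IndexError case,
-- excluded by Pre_.
def suffix_is_less (suffix_1 : List String) (suffix_2 : List String) : Bool :=
  match PySem.List.pyGet? suffix_1 (-1), PySem.List.pyGet? suffix_2 (-1) with
  | some a, some b =>
    if b < a then false                       -- suffix_1[-1] > suffix_2[-1]
    else if a = b then
      if suffix_1.length > 1 then
        if suffix_2.length ≤ 1 then false
        else suffix_is_less (PySem.List.slice suffix_1 none (some (-1)))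
                            (PySem.List.slice suffix_2 none (some (-1)))
      else true
    else true
  | _, _ => true
termination_by suffix_1.length
decreasing_by
  simp only [PySem.List.slice_to_neg_one, List.length_dropLast]
  omega

-- ===== PORT B =====
-- Python's built-in list `<=` (non-strict lexicographic on element `<`):
def lexLe : List String → List String → Bool
  | [], _ => true
  | _ :: _, [] => false
  | a :: as, b :: bs => if a < b then true else if a = b then lexLe as bs else false

-- literal transliteration of Source B; xs[::-1] is List.reverse
-- (exact: PySem.List.slice?_none_none_neg_one).
def suffix_is_less_alt (suffix_1 : List String) (suffix_2 : List String) : Bool :=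
  match PySem.List.pyGet? suffix_1 (-1) with
  | none => true
  | some a =>
    match PySem.List.pyGet? suffix_2 (-1) with
    | none => true
    | some b =>
      if a ≠ b then decide (a < b)
      else lexLe suffix_1.reverse suffix_2.reverse

-- ===== PRECONDITION & SPEC =====
-- A (and B) raise IndexError on `[-1]` when either list is empty; exactly those inputs are excluded.
def Pre_suffix_is_less (suffix_1 : List String) (suffix_2 : List String) : Prop :=
  suffix_1 ≠ [] ∧ suffix_2 ≠ []
instance (suffix_1 : List String) (suffix_2 : List String) : Decidable (Pre_suffix_is_less suffix_1 suffix_2) := by unfold Pre_suffix_is_less; infer_instance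

def pvWitness_suffix_is_less : List String × List String := (["com", "a"], ["com", "b"])

def Spec_suffix_is_less (suffix_1 : List String) (suffix_2 : List String) (out : Bool) : Prop := out = suffix_is_less_alt suffix_1 suffix_2
instance (suffix_1 : List String) (suffix_2 : List String) (out : Bool) : Decidable (Spec_suffix_is_less suffix_1 suffix_2 out) := by unfold Spec_suffix_is_less; infer_instance

-- ===== CLAIM (what is proved, stated in full; the proofs are below) =====
def Claim_equal_suffix_is_less : Prop := ∀ (suffix_1 : List String) (suffix_2 : List String), Dom_suffix_is_less suffix_1 suffix_2 → Pre_suffix_is_less suffix_1 suffix_2 → Spec_suffix_is_less suffix_1 suffix_2 (suffix_is_less suffix_1 suffix_2)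

-- ===== LEMMAS AND PROOFS =====

-- Both ports compute `lexLe` of the reversed lists on nonempty inputs.
theorem suffix_is_less_eq_lexLe_aux :
    ∀ (n : Nat) (xs ys : List String), xs.length ≤ n → xs ≠ [] → ys ≠ [] →
      suffix_is_less xs ys = lexLe xs.reverse ys.reverse := by
  intro n
  induction n with
  | zero => intro xs ys hn hx hy; exact absurd (List.length_eq_zero_iff.mp (by omega)) hx
  | succ n ih =>
    intro xs ys hn hx hy
    have hgx : PySem.List.pyGet? xs (-1) = some (xs.getLast hx) := by
      simp [PySem.List.pyGet?_neg_one, List.getLast?_eq_getLast_of_ne_nil hx]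
    have hgy : PySem.List.pyGet? ys (-1) = some (ys.getLast hy) := by
      simp [PySem.List.pyGet?_neg_one, List.getLast?_eq_getLast_of_ne_nil hy]
    have hxr : xs.reverse = xs.getLast hx :: xs.dropLast.reverse := by
      conv_lhs => rw [← List.dropLast_append_getLast hx]
      simp
    have hyr : ys.reverse = ys.getLast hy :: ys.dropLast.reverse := by
      conv_lhs => rw [← List.dropLast_append_getLast hy]
      simp
    rw [suffix_is_less, hgx, hgy, hxr, hyr]
    generalize xs.getLast hx = a
    generalize ys.getLast hy = b
    by_cases hba : b < a
    · simp [lexLe, hba, (lt_asymm hba), (ne_of_gt hba)]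
    · by_cases hab : a = b
      · subst hab
        simp only [hba, if_false, lexLe]
        by_cases h1 : xs.length > 1
        · by_cases h2 : ys.length ≤ 1
          · -- ys is a singleton: its dropLast is [], xs.dropLast is not
            have hy1 : ys.dropLast = [] := by
              apply List.length_eq_zero_iff.mp
              simp only [List.length_dropLast]; omega
            have hx1 : xs.dropLast ≠ [] := by
              intro h
              have := congrArg List.length h
              simp only [List.length_dropLast, List.length_nil] at this; omega
            rw [if_pos h1, if_pos h2, hy1]
            cases hdx : xs.dropLast.reverse with
            | nil => exact absurd (by simpa using hdx) hx1
            | cons c cs => simp [lexLe]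
          · have h2' : ys.length > 1 := by omega
            have hx1 : xs.dropLast ≠ [] := by
              intro h
              have := congrArg List.length h
              simp only [List.length_dropLast, List.length_nil] at this; omega
            have hy1 : ys.dropLast ≠ [] := by
              intro h
              have := congrArg List.length h
              simp only [List.length_dropLast, List.length_nil] at this; omega
            rw [if_pos h1, if_neg h2]
            rw [PySem.List.slice_to_neg_one, PySem.List.slice_to_neg_one]
            exact ih xs.dropLast ys.dropLast (by simp [List.length_dropLast]; omega) hx1 hy1
        · have hx1 : xs.dropLast = [] := by
            apply List.length_eq_zero_iff.mp
            simp only [List.length_dropLast]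
            have := List.length_pos_of_ne_nil hx; omega
          rw [if_neg h1, hx1]
          simp [lexLe]
      · have hab' : a < b := lt_of_le_of_ne (not_lt.mp hba) hab
        simp [lexLe, hba, hab, hab']

theorem suffix_is_less_alt_eq_lexLe (xs ys : List String) (hx : xs ≠ []) (hy : ys ≠ []) :
    suffix_is_less_alt xs ys = lexLe xs.reverse ys.reverse := by
  have hgx : PySem.List.pyGet? xs (-1) = some (xs.getLast hx) := by
    simp [PySem.List.pyGet?_neg_one, List.getLast?_eq_getLast_of_ne_nil hx]
  have hgy : PySem.List.pyGet? ys (-1) = some (ys.getLast hy) := by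
    simp [PySem.List.pyGet?_neg_one, List.getLast?_eq_getLast_of_ne_nil hy]
  have hxr : xs.reverse = xs.getLast hx :: xs.dropLast.reverse := by
    conv_lhs => rw [← List.dropLast_append_getLast hx]
    simp
  have hyr : ys.reverse = ys.getLast hy :: ys.dropLast.reverse := by
    conv_lhs => rw [← List.dropLast_append_getLast hy]
    simp
  simp only [suffix_is_less_alt, hgx, hgy]
  set a := xs.getLast hx
  set b := ys.getLast hy
  by_cases hab : a = b
  · simp [hab]
  · rw [if_pos hab, hxr, hyr]
    by_cases hlt : a < b
    · simp [lexLe, hlt]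
    · simp [lexLe, hlt, hab]

-- ===== VERDICT (by name: the statement is the Claim_ definition above) =====
theorem suffix_is_less_spec : Claim_equal_suffix_is_less := by
  intro s1 s2 _ hpre
  obtain ⟨h1, h2⟩ := hpre
  unfold Spec_suffix_is_less
  rw [suffix_is_less_eq_lexLe_aux s1.length s1 s2 le_rfl h1 h2,
      suffix_is_less_alt_eq_lexLe s1 s2 h1 h2]
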